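-- pv_equiv track=rewrite | github.com/dtempestini/health-bot | infra/envs/dev/lambda/stats_api.py | _sum_rows
-- ===== SOURCE A (Python) =====
-- def _sum_rows(rows):
--     cal = pro = carb = fat = 0
--     for it in rows:
--         cal += int(it.get("calories", 0))
--         pro += int(it.get("protein", 0))
--         carb += int(it.get("carbs", 0))
--         fat += int(it.get("fat", 0))
--     return {"cal": cal, "pro": pro, "carb": carb, "fat": fat}
-- ===== SOURCE B (Python) =====
-- def _sum_rows(rows):
--     def total(key):
--         return sum(int(it.get(key, 0)) for it in rows)
--     return {"cal": total("calories"), "pro": total("protein"),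
--             "carb": total("carbs"), "fat": total("fat")}
-- ===== Notes on version B (the rewrite author's own statement) =====
-- stated objective: idiomatic
-- what changed: The single four-accumulator loop is replaced by a dict literal of four independent sum() generator expressions (four passes over rows instead of one).
import Mathlib
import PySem

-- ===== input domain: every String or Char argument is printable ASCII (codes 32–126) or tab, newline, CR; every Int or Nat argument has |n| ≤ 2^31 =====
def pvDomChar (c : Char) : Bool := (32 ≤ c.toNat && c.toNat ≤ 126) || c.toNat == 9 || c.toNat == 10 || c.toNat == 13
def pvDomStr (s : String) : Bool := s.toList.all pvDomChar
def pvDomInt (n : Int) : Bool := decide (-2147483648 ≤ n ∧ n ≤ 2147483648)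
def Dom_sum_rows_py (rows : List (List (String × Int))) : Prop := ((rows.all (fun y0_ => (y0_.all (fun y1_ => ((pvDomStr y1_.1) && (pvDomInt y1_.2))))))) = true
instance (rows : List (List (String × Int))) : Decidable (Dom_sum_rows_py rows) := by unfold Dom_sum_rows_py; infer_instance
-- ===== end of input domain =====

-- B replaces A's single four-accumulator loop by four independent sums, one per field (idiomatic; same cost).
-- ===== PORT A =====
-- it.get(key, 0) on the row dict; int() on an int is the identity.
def pvGetRow (it : List (String × Int)) (k : String) : Int :=
  (PySem.Dict.mk it).getD k 0

def sum_rows_py (rows : List (List (String × Int))) : List (String × Int) :=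
  let st := rows.foldl
    (fun (s : Int × Int × Int × Int) it =>
      (s.1 + pvGetRow it "calories", s.2.1 + pvGetRow it "protein",
       s.2.2.1 + pvGetRow it "carbs", s.2.2.2 + pvGetRow it "fat"))
    (0, 0, 0, 0)
  [("cal", st.1), ("pro", st.2.1), ("carb", st.2.2.1), ("fat", st.2.2.2)]

-- ===== PORT B =====
def pvTotal (rows : List (List (String × Int))) (k : String) : Int :=
  (rows.map (fun it => pvGetRow it k)).sum

def sum_rows_py_alt (rows : List (List (String × Int))) : List (String × Int) :=
  [("cal", pvTotal rows "calories"), ("pro", pvTotal rows "protein"),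
   ("carb", pvTotal rows "carbs"), ("fat", pvTotal rows "fat")]

-- ===== PRECONDITION & SPEC =====
def Spec_sum_rows_py (rows : List (List (String × Int))) (out : List (String × Int)) : Prop := out = sum_rows_py_alt rows
instance (rows : List (List (String × Int))) (out : List (String × Int)) : Decidable (Spec_sum_rows_py rows out) := by unfold Spec_sum_rows_py; infer_instance

-- ===== CLAIM (what is proved, stated in full; the proofs are below) =====
def Claim_equal_sum_rows_py : Prop := ∀ (rows : List (List (String × Int))), Dom_sum_rows_py rows → Spec_sum_rows_py rows (sum_rows_py rows)

-- ===== LEMMAS AND PROOFS =====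

-- ===== VERDICT (by name: the statement is the Claim_ definition above) =====
theorem pvFold_eq (rows : List (List (String × Int))) (c p b f : Int) :
    rows.foldl
      (fun (s : Int × Int × Int × Int) it =>
        (s.1 + pvGetRow it "calories", s.2.1 + pvGetRow it "protein",
         s.2.2.1 + pvGetRow it "carbs", s.2.2.2 + pvGetRow it "fat"))
      (c, p, b, f)
    = (c + pvTotal rows "calories", p + pvTotal rows "protein",
       b + pvTotal rows "carbs", f + pvTotal rows "fat") := by
  induction rows generalizing c p b f with
  | nil => simp [pvTotal]
  | cons it rest ih =>
    simp only [List.foldl_cons, ih, pvTotal, List.map_cons, List.sum_cons]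
    simp [Prod.ext_iff]
    omega

theorem sum_rows_py_spec : Claim_equal_sum_rows_py := by
  intro rows _
  unfold Spec_sum_rows_py sum_rows_py sum_rows_py_alt
  simp only [pvFold_eq, zero_add]
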